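-- pv_equiv track=rewrite | github.com/salucallc/alfred-coo-svc | src/alfred_coo/structured.py | _find_json_object
-- ===== SOURCE A (Python) =====
-- from typing import Any, Dict, List, Optional
--
-- def _find_json_object(text: str) -> Optional[str]:
--     """Find the first balanced top-level JSON object in text.
--
--     Scans for an opening brace and returns the substring up to the matching
--     close, tracking string quoting so braces inside strings don't confuse the
--     balance counter. Returns None if no balanced object is found.
--     """
--     start = text.find("{")
--     if start == -1:
--         return None
--     depth = 0
--     in_string = False
--     escape = False
--     for i in range(start, len(text)):
--         ch = text[i]
--         if in_string:
--             if escape: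
--                 escape = False
--             elif ch == "\\":
--                 escape = True
--             elif ch == '"':
--                 in_string = False
--             continue
--         if ch == '"':
--             in_string = True
--             continue
--         if ch == "{":
--             depth += 1
--         elif ch == "}":
--             depth -= 1
--             if depth == 0:
--                 return text[start : i + 1]
--     return None
-- ===== SOURCE B (Python) =====
-- def _find_json_object(text):
--     start = text.find("{")
--     if start == -1:
--         return None
--     depth = 0
--     pos = start
--     while True:
--         hits = [j for j in (text.find(c, pos) for c in ('{', '}', '"')) if j != -1]
--         if not hits:
--             return None
--         j = min(hits)
--         ch = text[j]
--         if ch == '{':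
--             depth += 1
--             pos = j + 1
--         elif ch == '}':
--             depth -= 1
--             if depth == 0:
--                 return text[start:j + 1]
--             pos = j + 1
--         else:
--             q = _skip_string(text, j + 1)
--             if q == -1:
--                 return None
--             pos = q + 1
--
--
-- def _skip_string(text, k):
--     """Index of the closing quote of a string body starting at k, else -1.
--
--     A quote closes the string iff the backslash run immediately before it
--     has even length (run parity replaces a per-character escape flag)."""
--     while True:
--         q = text.find('"', k)
--         if q == -1:
--             return -1
--         r = q - 1
--         while r >= 0 and text[r] == '\\':
--             r -= 1
--         if (q - 1 - r) % 2 == 0: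
--             return q
--         k = q + 1
-- ===== Notes on version B (the rewrite author's own statement) =====
-- stated objective: alternative
-- what changed: Replaced A's per-character state machine (in_string/escape flags) by find-driven jumps: the outer loop jumps straight to the next '{', '}' or '"' via str.find and keeps only the depth counter, and a helper closes each string by locating candidate quotes with str.find and testing the parity of the backslash run before them instead of carrying an escape flag.
import Mathlib
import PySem

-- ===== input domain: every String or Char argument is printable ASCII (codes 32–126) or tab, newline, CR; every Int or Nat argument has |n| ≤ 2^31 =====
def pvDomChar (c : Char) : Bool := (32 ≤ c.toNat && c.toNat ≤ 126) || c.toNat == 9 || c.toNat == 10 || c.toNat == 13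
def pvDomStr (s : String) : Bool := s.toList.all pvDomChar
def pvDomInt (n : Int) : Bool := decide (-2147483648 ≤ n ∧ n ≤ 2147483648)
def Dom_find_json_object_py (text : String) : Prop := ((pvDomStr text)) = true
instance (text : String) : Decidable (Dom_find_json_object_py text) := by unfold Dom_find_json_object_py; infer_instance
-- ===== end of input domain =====

-- B replaces A's per-character state machine (in_string/escape flags) by find-driven
-- jumps between the special characters { } " and decides whether a quote closes a
-- string by the parity of the backslash run before it; objective: alternative, same
-- linear cost.

-- ===== PORT A =====
-- A's for-loop over range(start, len(text)) with state (depth, in_string, escape);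
-- i is the absolute index into the text.
def pvLoopA (t : List Char) (i : Nat) (depth : Int) (inStr esc : Bool) : Option Nat :=
  if h : i < t.length then
    -- ch = text[i] (inlined)
    if inStr then
      if esc then pvLoopA t (i+1) depth true false
      else if t[i] = '\\' then pvLoopA t (i+1) depth true true
      else if t[i] = '"' then pvLoopA t (i+1) depth false false
      else pvLoopA t (i+1) depth true false
    else if t[i] = '"' then pvLoopA t (i+1) depth true false
    else if t[i] = '{' then pvLoopA t (i+1) (depth+1) false false
    else if t[i] = '}' then
      if depth - 1 = 0 then some i else pvLoopA t (i+1) (depth-1) false false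
    else pvLoopA t (i+1) depth false false
  else none
  termination_by t.length - i

def find_json_object_py (text : String) : Option String :=
  let start := PySem.Str.find text "{"
  if start = -1 then none
  else
    match pvLoopA text.toList start.toNat 0 false false with
    | none => none
    | some i => some (PySem.Str.slice text (some start) (some ((i : Int) + 1)))

-- ===== PORT B =====
-- text.find(c, pos) for a single character c: first index ≥ pos holding c (exact).
def pvFindCh (t : List Char) (c : Char) (pos : Nat) : Option Nat :=
  if h : pos < t.length then
    if t[pos] = c then some pos else pvFindCh t c (pos+1)
  else none
  termination_by t.length - pos

-- length of the backslash run ending just before index q (B's inner r-loop).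
def pvBsRun (t : List Char) (q : Nat) : Nat :=
  if q ≠ 0 ∧ t.getD (q-1) ' ' = '\\' then pvBsRun t (q-1) + 1 else 0
  termination_by q
  decreasing_by omega

-- termination helpers cited by the ports' decreasing_by
theorem pvFindCh_bounds_aux (t : List Char) (c : Char) : ∀ (n pos q : Nat),
    t.length - pos ≤ n → pvFindCh t c pos = some q → pos ≤ q ∧ q < t.length := by
  intro n
  induction n with
  | zero =>
      intro pos q h hf
      rw [pvFindCh] at hf
      rw [dif_neg (by omega)] at hf
      exact absurd hf (by simp)
  | succ n ih =>
      intro pos q h hf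
      rw [pvFindCh] at hf
      by_cases hp : pos < t.length
      · rw [dif_pos hp] at hf
        by_cases hc : t[pos] = c
        · rw [if_pos hc] at hf
          cases hf; omega
        · rw [if_neg hc] at hf
          have := ih (pos+1) q (by omega) hf
          omega
      · rw [dif_neg hp] at hf
        exact absurd hf (by simp)

theorem pvFindCh_bounds (t : List Char) (c : Char) (pos q : Nat)
    (h : pvFindCh t c pos = some q) : pos ≤ q ∧ q < t.length :=
  pvFindCh_bounds_aux t c (t.length - pos) pos q le_rfl h

def pvSkipString (t : List Char) (k : Nat) : Option Nat :=
  match h : pvFindCh t '"' k with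
  | none => none
  | some q =>
    if pvBsRun t q % 2 = 0 then some q else pvSkipString t (q+1)
  termination_by t.length - k
  decreasing_by
    have := pvFindCh_bounds t '"' k q h
    omega

def pvMin2 : Option Nat → Option Nat → Option Nat
  | none, b => b
  | some a, none => some a
  | some a, some b => some (min a b)

theorem pvMin2_bounds (t : List Char) (pos j : Nat)
    (h : pvMin2 (pvMin2 (pvFindCh t '{' pos) (pvFindCh t '}' pos)) (pvFindCh t '"' pos) = some j) :
    pos ≤ j ∧ j < t.length := by
  cases h1 : pvFindCh t '{' pos with
  | none => cases h2 : pvFindCh t '}' pos with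
    | none => cases h3 : pvFindCh t '"' pos with
      | none => rw [h1, h2, h3] at h; exact absurd h (by simp [pvMin2])
      | some a => rw [h1, h2, h3] at h; simp [pvMin2] at h; subst h; exact pvFindCh_bounds t '"' pos a h3
    | some a => cases h3 : pvFindCh t '"' pos with
      | none => rw [h1, h2, h3] at h; simp [pvMin2] at h; subst h; exact pvFindCh_bounds t '}' pos a h2
      | some b =>
          rw [h1, h2, h3] at h; simp [pvMin2] at h; subst h
          have := pvFindCh_bounds t '}' pos a h2
          have := pvFindCh_bounds t '"' pos b h3
          simp [Nat.min_def]; split <;> omega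
  | some a => cases h2 : pvFindCh t '}' pos with
    | none => cases h3 : pvFindCh t '"' pos with
      | none => rw [h1, h2, h3] at h; simp [pvMin2] at h; subst h; exact pvFindCh_bounds t '{' pos a h1
      | some b =>
          rw [h1, h2, h3] at h; simp [pvMin2] at h; subst h
          have := pvFindCh_bounds t '{' pos a h1
          have := pvFindCh_bounds t '"' pos b h3
          simp [Nat.min_def]; split <;> omega
    | some b => cases h3 : pvFindCh t '"' pos with
      | none =>
          rw [h1, h2, h3] at h; simp [pvMin2] at h; subst h
          have := pvFindCh_bounds t '{' pos a h1
          have := pvFindCh_bounds t '}' pos b h2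
          simp [Nat.min_def]; split <;> omega
      | some c =>
          rw [h1, h2, h3] at h; simp [pvMin2] at h; subst h
          have := pvFindCh_bounds t '{' pos a h1
          have := pvFindCh_bounds t '}' pos b h2
          have := pvFindCh_bounds t '"' pos c h3
          simp [Nat.min_def]; split <;> split <;> omega

theorem pvSkipString_bounds_aux (t : List Char) : ∀ (n k q : Nat),
    t.length - k ≤ n → pvSkipString t k = some q → k ≤ q ∧ q < t.length := by
  intro n
  induction n with
  | zero =>
      intro k q h hf
      rw [pvSkipString.eq_def] at hf
      split at hf
      · exact absurd hf (by simp)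
      · rename_i q0 hfind
        have hb := pvFindCh_bounds t '"' k q0 hfind
        omega
  | succ n ih =>
      intro k q h hf
      rw [pvSkipString.eq_def] at hf
      split at hf
      · exact absurd hf (by simp)
      · rename_i q0 hfind
        have hb := pvFindCh_bounds t '"' k q0 hfind
        by_cases he : pvBsRun t q0 % 2 = 0
        · rw [if_pos he] at hf; cases hf; omega
        · rw [if_neg he] at hf
          have := ih (q0+1) q (by omega) hf
          omega

theorem pvSkipString_bounds (t : List Char) (k q : Nat)
    (h : pvSkipString t k = some q) : k ≤ q ∧ q < t.length :=
  pvSkipString_bounds_aux t (t.length - k) k q le_rfl h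

-- B's outer loop: jump to the next special character; strings are closed by
-- backslash-run parity via pvSkipString.
def pvLoopB (t : List Char) (pos : Nat) (depth : Int) : Option Nat :=
  match h : pvMin2 (pvMin2 (pvFindCh t '{' pos) (pvFindCh t '}' pos)) (pvFindCh t '"' pos) with
  | none => none
  | some j =>
    -- ch = text[j] (inlined; getD: j < len is proved by pvMin2_bounds, not carried)
    if t.getD j ' ' = '{' then pvLoopB t (j+1) (depth+1)
    else if t.getD j ' ' = '}' then
      if depth - 1 = 0 then some j else pvLoopB t (j+1) (depth-1)
    else
      match h2 : pvSkipString t (j+1) with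
      | none => none
      | some q => pvLoopB t (q+1) depth
  termination_by t.length - pos
  decreasing_by
  · have := pvMin2_bounds t pos j h
    omega
  · have := pvMin2_bounds t pos j h
    omega
  · have h1 := pvMin2_bounds t pos j h
    have h3 := pvSkipString_bounds t (j+1) q h2
    omega

def find_json_object_py_alt (text : String) : Option String :=
  let start := PySem.Str.find text "{"
  if start = -1 then none
  else
    match pvLoopB text.toList start.toNat 0 with
    | none => none
    | some i => some (PySem.Str.slice text (some start) (some ((i : Int) + 1)))

-- ===== PRECONDITION & SPEC =====
def Spec_find_json_object_py (text : String) (out : Option String) : Prop := out = find_json_object_py_alt text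
instance (text : String) (out : Option String) : Decidable (Spec_find_json_object_py text out) := by unfold Spec_find_json_object_py; infer_instance

-- ===== CLAIM (what is proved, stated in full; the proofs are below) =====
def Claim_equal_find_json_object_py : Prop := ∀ (text : String), Dom_find_json_object_py text → Spec_find_json_object_py text (find_json_object_py text)

-- ===== LEMMAS AND PROOFS =====

-- step lemmas for A's loop
theorem loopA_oob (t : List Char) (i : Nat) (d : Int) (s e : Bool) (hp : ¬ i < t.length) :
    pvLoopA t i d s e = none := by
  rw [pvLoopA.eq_def, dif_neg hp]

theorem loopA_esc (t : List Char) (i : Nat) (d : Int) (hp : i < t.length) :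
    pvLoopA t i d true true = pvLoopA t (i+1) d true false := by
  rw [pvLoopA.eq_def, dif_pos hp]; simp

theorem loopA_str_bs (t : List Char) (i : Nat) (d : Int) (hp : i < t.length)
    (hc : t[i] = '\\') : pvLoopA t i d true false = pvLoopA t (i+1) d true true := by
  rw [pvLoopA.eq_def, dif_pos hp]; simp [hc]

theorem loopA_str_q (t : List Char) (i : Nat) (d : Int) (hp : i < t.length)
    (hc : t[i] = '"') : pvLoopA t i d true false = pvLoopA t (i+1) d false false := by
  rw [pvLoopA.eq_def, dif_pos hp]
  simp [hc, show ('"':Char) ≠ '\\' from by decide]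

theorem loopA_str_other (t : List Char) (i : Nat) (d : Int) (hp : i < t.length)
    (h1 : ¬ t[i] = '\\') (h2 : ¬ t[i] = '"') :
    pvLoopA t i d true false = pvLoopA t (i+1) d true false := by
  rw [pvLoopA.eq_def, dif_pos hp]; simp [h1, h2]

theorem loopA_q (t : List Char) (i : Nat) (d : Int) (hp : i < t.length)
    (hc : t[i] = '"') : pvLoopA t i d false false = pvLoopA t (i+1) d true false := by
  rw [pvLoopA.eq_def, dif_pos hp]; simp [hc]

theorem loopA_open (t : List Char) (i : Nat) (d : Int) (hp : i < t.length)
    (hc : t[i] = '{') : pvLoopA t i d false false = pvLoopA t (i+1) (d+1) false false := by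
  rw [pvLoopA.eq_def, dif_pos hp]
  simp [hc, show ('{':Char) ≠ '"' from by decide]

theorem loopA_close (t : List Char) (i : Nat) (d : Int) (hp : i < t.length)
    (hc : t[i] = '}') : pvLoopA t i d false false
      = if d - 1 = 0 then some i else pvLoopA t (i+1) (d-1) false false := by
  rw [pvLoopA.eq_def, dif_pos hp]
  simp [hc, show ('}':Char) ≠ '"' from by decide, show ('}':Char) ≠ '{' from by decide]

theorem loopA_other (t : List Char) (i : Nat) (d : Int) (hp : i < t.length)
    (h1 : ¬ t[i] = '"') (h2 : ¬ t[i] = '{') (h3 : ¬ t[i] = '}') :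
    pvLoopA t i d false false = pvLoopA t (i+1) d false false := by
  rw [pvLoopA.eq_def, dif_pos hp]; simp [h1, h2, h3]

-- step lemmas for pvFindCh
theorem findCh_oob (t : List Char) (c : Char) (pos : Nat) (hp : ¬ pos < t.length) :
    pvFindCh t c pos = none := by
  rw [pvFindCh.eq_def, dif_neg hp]

theorem findCh_hit (t : List Char) (c : Char) (pos : Nat) (hp : pos < t.length)
    (hc : t[pos] = c) : pvFindCh t c pos = some pos := by
  rw [pvFindCh.eq_def, dif_pos hp, if_pos hc]

theorem findCh_step (t : List Char) (c : Char) (pos : Nat) (hp : pos < t.length)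
    (hc : ¬ t[pos] = c) : pvFindCh t c pos = pvFindCh t c (pos+1) := by
  rw [pvFindCh.eq_def, dif_pos hp, if_neg hc]

-- pvMin2 helpers
theorem min2_ge (a : Nat) (X Y : Option Nat) (hX : ∀ b, X = some b → a ≤ b)
    (hY : ∀ b, Y = some b → a ≤ b) : ∀ b, pvMin2 X Y = some b → a ≤ b := by
  cases X with
  | none => cases Y with
    | none => intro b hb; exact absurd hb (by simp [pvMin2])
    | some y => intro b hb; simp [pvMin2] at hb; subst hb; exact hY _ rfl
  | some x => cases Y with
    | none => intro b hb; simp [pvMin2] at hb; subst hb; exact hX _ rfl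
    | some y =>
        intro b hb; simp [pvMin2] at hb; subst hb
        have := hX x rfl; have := hY y rfl
        simp [Nat.min_def]; split <;> omega

theorem min2_some_left (a : Nat) (X : Option Nat) (hX : ∀ b, X = some b → a ≤ b) :
    pvMin2 (some a) X = some a := by
  cases X with
  | none => rfl
  | some b => simp [pvMin2]; exact hX b rfl

theorem min2_some_right (a : Nat) (X : Option Nat) (hX : ∀ b, X = some b → a ≤ b) :
    pvMin2 X (some a) = some a := by
  cases X with
  | none => rfl
  | some b => simp [pvMin2]; exact hX b rfl

theorem findCh_ge (t : List Char) (c : Char) (pos : Nat) :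
    ∀ b, pvFindCh t c (pos+1) = some b → pos ≤ b := by
  intro b hb; have := pvFindCh_bounds t c (pos+1) b hb; omega

-- B's first-special-character characterisation of the min of the three finds
def pvNextSpec (t : List Char) (pos : Nat) : Option Nat :=
  if h : pos < t.length then
    if t[pos] = '{' ∨ t[pos] = '}' ∨ t[pos] = '"' then some pos else pvNextSpec t (pos+1)
  else none
  termination_by t.length - pos

theorem nextSpec_oob (t : List Char) (pos : Nat) (hp : ¬ pos < t.length) :
    pvNextSpec t pos = none := by
  rw [pvNextSpec.eq_def, dif_neg hp]

theorem nextSpec_hit (t : List Char) (pos : Nat) (hp : pos < t.length)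
    (hc : t[pos] = '{' ∨ t[pos] = '}' ∨ t[pos] = '"') : pvNextSpec t pos = some pos := by
  rw [pvNextSpec.eq_def, dif_pos hp, if_pos hc]

theorem nextSpec_step (t : List Char) (pos : Nat) (hp : pos < t.length)
    (hc : ¬ (t[pos] = '{' ∨ t[pos] = '}' ∨ t[pos] = '"')) :
    pvNextSpec t pos = pvNextSpec t (pos+1) := by
  rw [pvNextSpec.eq_def, dif_pos hp, if_neg hc]

theorem mins_eq_aux (t : List Char) : ∀ (n pos : Nat), t.length - pos ≤ n →
    pvMin2 (pvMin2 (pvFindCh t '{' pos) (pvFindCh t '}' pos)) (pvFindCh t '"' pos)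
      = pvNextSpec t pos := by
  intro n
  induction n with
  | zero =>
      intro pos h
      have hp : ¬ pos < t.length := by omega
      rw [findCh_oob t '{' pos hp, findCh_oob t '}' pos hp, findCh_oob t '"' pos hp,
        nextSpec_oob t pos hp]
      rfl
  | succ n ih =>
      intro pos h
      by_cases hp : pos < t.length
      · by_cases h1 : t[pos] = '{'
        · rw [findCh_hit t '{' pos hp h1,
            findCh_step t '}' pos hp (by rw [h1]; decide),
            findCh_step t '"' pos hp (by rw [h1]; decide),
            min2_some_left pos _ (findCh_ge t '}' pos),
            min2_some_left pos _ (findCh_ge t '"' pos),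
            nextSpec_hit t pos hp (Or.inl h1)]
        · by_cases h2 : t[pos] = '}'
          · rw [findCh_hit t '}' pos hp h2,
              findCh_step t '{' pos hp (by rw [h2]; decide),
              findCh_step t '"' pos hp (by rw [h2]; decide),
              min2_some_right pos _ (findCh_ge t '{' pos),
              min2_some_left pos _ (findCh_ge t '"' pos),
              nextSpec_hit t pos hp (Or.inr (Or.inl h2))]
          · by_cases h3 : t[pos] = '"'
            · rw [findCh_hit t '"' pos hp h3,
                findCh_step t '{' pos hp (by rw [h3]; decide),
                findCh_step t '}' pos hp (by rw [h3]; decide),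
                min2_some_right pos _
                  (min2_ge pos _ _ (findCh_ge t '{' pos) (findCh_ge t '}' pos)),
                nextSpec_hit t pos hp (Or.inr (Or.inr h3))]
            · rw [findCh_step t '{' pos hp h1, findCh_step t '}' pos hp h2,
                findCh_step t '"' pos hp h3,
                nextSpec_step t pos hp (by simp [h1, h2, h3])]
              exact ih (pos+1) (by omega)
      · rw [findCh_oob t '{' pos hp, findCh_oob t '}' pos hp, findCh_oob t '"' pos hp,
          nextSpec_oob t pos hp]
        rfl

theorem mins_eq (t : List Char) (pos : Nat) :
    pvMin2 (pvMin2 (pvFindCh t '{' pos) (pvFindCh t '}' pos)) (pvFindCh t '"' pos)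
      = pvNextSpec t pos :=
  mins_eq_aux t (t.length - pos) pos le_rfl

-- A's in-string machine finds the closing quote here:
def pvAClose (t : List Char) (k : Nat) : Option Nat :=
  if h : k < t.length then
    if t[k] = '"' then some k
    else if t[k] = '\\' then pvAClose t (k+2) else pvAClose t (k+1)
  else none
  termination_by t.length - k

theorem aClose_oob (t : List Char) (k : Nat) (hp : ¬ k < t.length) : pvAClose t k = none := by
  rw [pvAClose.eq_def, dif_neg hp]

theorem aClose_hit (t : List Char) (k : Nat) (hp : k < t.length) (hc : t[k] = '"') :
    pvAClose t k = some k := by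
  rw [pvAClose.eq_def, dif_pos hp, if_pos hc]

theorem aClose_bs (t : List Char) (k : Nat) (hp : k < t.length) (hc : t[k] = '\\') :
    pvAClose t k = pvAClose t (k+2) := by
  rw [pvAClose.eq_def, dif_pos hp, if_neg (by rw [hc]; decide), if_pos hc]

theorem aClose_step (t : List Char) (k : Nat) (hp : k < t.length)
    (h1 : ¬ t[k] = '"') (h2 : ¬ t[k] = '\\') : pvAClose t k = pvAClose t (k+1) := by
  rw [pvAClose.eq_def, dif_pos hp, if_neg h1, if_neg h2]

-- A's in-string state machine runs exactly to where pvAClose lands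
theorem loopA_string_aux (t : List Char) : ∀ (n k : Nat), t.length - k ≤ n → ∀ (d : Int),
    pvLoopA t k d true false
      = (match pvAClose t k with
          | none => none
          | some q => pvLoopA t (q+1) d false false) := by
  intro n
  induction n with
  | zero =>
      intro k h d
      have hp : ¬ k < t.length := by omega
      rw [loopA_oob t k d true false hp, aClose_oob t k hp]
  | succ n ih =>
      intro k h d
      by_cases hp : k < t.length
      · by_cases hq : t[k] = '"'
        · rw [loopA_str_q t k d hp hq, aClose_hit t k hp hq]
        · by_cases hb : t[k] = '\\'
          · rw [loopA_str_bs t k d hp hb, aClose_bs t k hp hb]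
            by_cases hp1 : k+1 < t.length
            · rw [loopA_esc t (k+1) d hp1]
              exact ih (k+2) (by omega) d
            · rw [loopA_oob t (k+1) d true true hp1,
                aClose_oob t (k+2) (by omega)]
          · rw [loopA_str_other t k d hp hb hq]
            rw [aClose_step t k hp hq hb]
            exact ih (k+1) (by omega) d
      · rw [loopA_oob t k d true false hp, aClose_oob t k hp]

-- pvBsRun and pvSkipString unfolding lemmas
theorem getD_eq_getElem (t : List Char) (k : Nat) (hp : k < t.length) :
    t.getD k ' ' = t[k] := by
  simp [List.getD, List.getElem?_eq_getElem hp]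

theorem bsRun_succ (t : List Char) (k : Nat) :
    pvBsRun t (k+1) = if t.getD k ' ' = '\\' then pvBsRun t k + 1 else 0 := by
  rw [pvBsRun]
  simp only [Nat.add_sub_cancel]
  by_cases hc : t.getD k ' ' = '\\'
  · rw [if_pos ⟨by omega, hc⟩, if_pos hc]
  · rw [if_neg (fun hh => hc hh.2), if_neg hc]

theorem skipString_eq_none (t : List Char) (k : Nat) (hfind : pvFindCh t '"' k = none) :
    pvSkipString t k = none := by
  rw [pvSkipString.eq_def]
  split
  · rfl
  · rename_i q0 h1; rw [hfind] at h1; cases h1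

theorem skipString_eq_some (t : List Char) (k q0 : Nat)
    (hfind : pvFindCh t '"' k = some q0) :
    pvSkipString t k
      = if pvBsRun t q0 % 2 = 0 then some q0 else pvSkipString t (q0+1) := by
  rw [pvSkipString.eq_def]
  split
  · rename_i h1; rw [hfind] at h1; cases h1
  · rename_i q1 h1; rw [hfind] at h1; cases h1; rfl

theorem skipString_oob (t : List Char) (k : Nat) (hp : ¬ k < t.length) :
    pvSkipString t k = none :=
  skipString_eq_none t k (findCh_oob t '"' k hp)

theorem skipString_step (t : List Char) (k : Nat) (hp : k < t.length)
    (hc : ¬ t[k] = '"') : pvSkipString t k = pvSkipString t (k+1) := by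
  cases hf : pvFindCh t '"' (k+1) with
  | none =>
      rw [skipString_eq_none t k (by rw [findCh_step t '"' k hp hc]; exact hf),
        skipString_eq_none t (k+1) hf]
  | some q0 =>
      rw [skipString_eq_some t k q0 (by rw [findCh_step t '"' k hp hc]; exact hf),
        skipString_eq_some t (k+1) q0 hf]

-- A's forward escape flag agrees with B's backward backslash-run parity
theorem close_eq_skip_aux (t : List Char) : ∀ (n k : Nat), t.length - k ≤ n →
    pvBsRun t k % 2 = 0 → pvAClose t k = pvSkipString t k := by
  intro n
  induction n with
  | zero =>
      intro k h hinv
      have hp : ¬ k < t.length := by omega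
      rw [aClose_oob t k hp, skipString_oob t k hp]
  | succ n ih =>
      intro k h hinv
      by_cases hp : k < t.length
      · by_cases hq : t[k] = '"'
        · rw [aClose_hit t k hp hq,
            skipString_eq_some t k k (findCh_hit t '"' k hp hq), if_pos hinv]
        · by_cases hb : t[k] = '\\'
          · rw [aClose_bs t k hp hb, skipString_step t k hp hq]
            have hgd : t.getD k ' ' = '\\' := by rw [getD_eq_getElem t k hp]; exact hb
            by_cases hp1 : k+1 < t.length
            · by_cases hq1 : t[k+1] = '"'
              · -- escaped quote at k+1: both skip past it
                have hrun : pvBsRun t (k+1) = pvBsRun t k + 1 := by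
                  rw [bsRun_succ, if_pos hgd]
                rw [skipString_eq_some t (k+1) (k+1) (findCh_hit t '"' (k+1) hp1 hq1),
                  if_neg (by omega)]
                exact ih (k+2) (by omega)
                  (by rw [bsRun_succ, if_neg (by
                        rw [getD_eq_getElem t (k+1) hp1, hq1]; decide)])
              · rw [skipString_step t (k+1) hp1 hq1]
                have hinv2 : pvBsRun t (k+2) % 2 = 0 := by
                  by_cases hb1 : t.getD (k+1) ' ' = '\\'
                  · rw [show k+2 = (k+1)+1 by rfl, bsRun_succ, if_pos hb1,
                      bsRun_succ, if_pos hgd]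
                    omega
                  · rw [show k+2 = (k+1)+1 by rfl, bsRun_succ, if_neg hb1]
                exact ih (k+2) (by omega) hinv2
            · rw [skipString_oob t (k+1) hp1, aClose_oob t (k+2) (by omega)]
          · rw [aClose_step t k hp hq hb, skipString_step t k hp hq]
            exact ih (k+1) (by omega)
              (by rw [bsRun_succ, if_neg (by rw [getD_eq_getElem t k hp]; exact hb)])
      · rw [aClose_oob t k hp, skipString_oob t k hp]

-- main loop equivalence
theorem loop_eq_aux (t : List Char) : ∀ (n pos : Nat), t.length - pos ≤ n → ∀ (d : Int),
    pvLoopA t pos d false false = pvLoopB t pos d := by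
  intro n
  induction n with
  | zero =>
      intro pos h d
      have hp : ¬ pos < t.length := by omega
      rw [loopA_oob t pos d false false hp, pvLoopB.eq_def, mins_eq,
        nextSpec_oob t pos hp]
  | succ n ih =>
      intro pos h d
      rw [pvLoopB.eq_def, mins_eq]
      by_cases hp : pos < t.length
      · by_cases h1 : t[pos] = '{'
        · rw [nextSpec_hit t pos hp (Or.inl h1), loopA_open t pos d hp h1]
          simp only [getD_eq_getElem t pos hp, h1, reduceIte]
          exact ih (pos+1) (by omega) (d+1)
        · by_cases h2 : t[pos] = '}'
          · rw [nextSpec_hit t pos hp (Or.inr (Or.inl h2)), loopA_close t pos d hp h2]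
            simp only [getD_eq_getElem t pos hp, h2,
              show ¬ (('}':Char) = '{') from by decide, reduceIte]
            by_cases hd : d - 1 = 0
            · rw [if_pos hd, if_pos hd]
            · rw [if_neg hd, if_neg hd]
              exact ih (pos+1) (by omega) (d-1)
          · by_cases h3 : t[pos] = '"'
            · rw [nextSpec_hit t pos hp (Or.inr (Or.inr h3)), loopA_q t pos d hp h3,
                loopA_string_aux t (t.length - (pos+1)) (pos+1) le_rfl d,
                close_eq_skip_aux t (t.length - (pos+1)) (pos+1) le_rfl
                  (by rw [bsRun_succ,
                      if_neg (by rw [getD_eq_getElem t pos hp, h3]; decide)])]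
              simp only [getD_eq_getElem t pos hp, h3,
                show ¬ (('"':Char) = '{') from by decide,
                show ¬ (('"':Char) = '}') from by decide, reduceIte]
              cases hsk : pvSkipString t (pos+1) with
              | none => rfl
              | some q =>
                  have hbq := pvSkipString_bounds t (pos+1) q hsk
                  exact ih (q+1) (by omega) d
            · rw [nextSpec_step t pos hp (by simp [h1, h2, h3]),
                loopA_other t pos d hp h3 h1 h2, ih (pos+1) (by omega) d,
                pvLoopB.eq_def, mins_eq]
      · rw [nextSpec_oob t pos hp, loopA_oob t pos d false false hp]

theorem loop_eq (t : List Char) (pos : Nat) (d : Int) :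
    pvLoopA t pos d false false = pvLoopB t pos d :=
  loop_eq_aux t (t.length - pos) pos le_rfl d

-- ===== VERDICT (by name: the statement is the Claim_ definition above) =====
theorem find_json_object_py_spec : Claim_equal_find_json_object_py := by
  intro text _
  unfold Spec_find_json_object_py
  simp only [find_json_object_py, find_json_object_py_alt, loop_eq]
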